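-- pv_equiv track=rewrite | github.com/DaltonCole/ProgramingProblems | kattis/islands/island.py | find_islands
-- ===== SOURCE A (Python) =====
-- def find_islands(numbers):
-- 	count = 1
--
-- 	smallest = min(numbers)
--
-- 	island = []
--
-- 	for num in numbers:
-- 		if num == smallest and island != []:
-- 			count += find_islands(island)
-- 			island = []
-- 		elif num == smallest:
-- 			pass
-- 		else:
-- 			island.append(num)
-- 	if island != []:
-- 		count += find_islands(island)
--
-- 	return count
-- ===== SOURCE B (Python) =====
-- def find_islands(numbers):
--     count = 0
--     stack = []
--     for num in numbers:
--         while stack and stack[-1] > num: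
--             stack.pop()
--         if not stack or stack[-1] < num:
--             stack.append(num)
--             count += 1
--     return count
-- ===== Notes on version B (the rewrite author's own statement) =====
-- stated objective: faster
-- what changed: replaced A's recursive split-at-the-minimum decomposition (which rescans and copies sublists at every recursion level) by one left-to-right pass with a monotonic stack that counts an island exactly when its level first rises above the surrounding water
import Mathlib
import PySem

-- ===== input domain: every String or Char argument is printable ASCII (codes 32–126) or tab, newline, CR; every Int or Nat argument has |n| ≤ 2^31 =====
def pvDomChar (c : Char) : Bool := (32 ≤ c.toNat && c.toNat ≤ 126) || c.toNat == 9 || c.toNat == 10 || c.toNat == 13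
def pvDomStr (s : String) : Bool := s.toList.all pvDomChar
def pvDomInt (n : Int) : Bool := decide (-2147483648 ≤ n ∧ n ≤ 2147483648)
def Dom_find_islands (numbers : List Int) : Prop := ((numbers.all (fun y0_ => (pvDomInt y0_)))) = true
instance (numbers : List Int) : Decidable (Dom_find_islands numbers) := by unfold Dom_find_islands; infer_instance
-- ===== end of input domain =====

-- B replaces A's recursive split-at-minimum decomposition by one left-to-right pass with a
-- monotonic stack (objective: faster on long inputs; return value only, no mutation involved).

-- ===== PORT A =====
-- the body of A's for-loop: update (count, island) for one element
def aStep (g : List Int → Int) (smallest : Int) (st : Int × List Int) (num : Int) : Int × List Int :=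
  if num = smallest ∧ st.2 ≠ [] then (st.1 + g st.2, [])
  else if num = smallest then st
  else (st.1, st.2 ++ [num])

-- A, with a fuel argument only to make the recursion (on ever-shorter sublists) structural;
-- fuel = numbers.length always suffices (each island is strictly shorter than its list)
def find_islands_fuel : Nat → List Int → Int
  | 0, _ => 0
  | fuel+1, numbers =>
    match PySem.List.min? numbers (fun x => x) with
    | none => 0   -- Python: min([]) raises ValueError; excluded by Pre_
    | some smallest =>
      let st := numbers.foldl (aStep (find_islands_fuel fuel) smallest) (1, [])
      if st.2 ≠ [] then st.1 + find_islands_fuel fuel st.2 else st.1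

def find_islands (numbers : List Int) : Int := find_islands_fuel numbers.length numbers

-- ===== PORT B =====
-- one element of B's loop: pop the stack down to ≤ num, then push num (and count it) if new
def bstep (st : List Int × Int) (num : Int) : List Int × Int :=
  let s := st.1.dropWhile (fun t => num < t)      -- while stack and stack[-1] > num: stack.pop()
  match s with
  | [] => (num :: s, st.2 + 1)                    -- if not stack or stack[-1] < num: push, count += 1
  | t :: _ => if t < num then (num :: s, st.2 + 1) else (s, st.2)

def find_islands_alt (numbers : List Int) : Int :=
  (numbers.foldl bstep ([], 0)).2

-- ===== PRECONDITION & SPEC =====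
-- Pre_ excludes only the empty list, on which Python A raises ValueError (min of empty sequence)
def Pre_find_islands (numbers : List Int) : Prop := numbers ≠ []
instance (numbers : List Int) : Decidable (Pre_find_islands numbers) := by unfold Pre_find_islands; infer_instance

def pvWitness_find_islands : List Int := [2, 1, 2]

def Spec_find_islands (numbers : List Int) (out : Int) : Prop := out = find_islands_alt numbers
instance (numbers : List Int) (out : Int) : Decidable (Spec_find_islands numbers out) := by unfold Spec_find_islands; infer_instance

-- ===== CLAIM (what is proved, stated in full; the proofs are below) =====
def Claim_equal_find_islands : Prop := ∀ (numbers : List Int), Dom_find_islands numbers → Pre_find_islands numbers → Spec_find_islands numbers (find_islands numbers)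

-- ===== LEMMAS AND PROOFS =====

-- the maximal runs of elements ≠ m, as A's loop accumulates them (isl = run built so far)
def parts (m : Int) : List Int → List Int → List (List Int)
  | isl, [] => if isl = [] then [] else [isl]
  | isl, x :: xs =>
    if x = m then (if isl = [] then parts m [] xs else isl :: parts m [] xs)
    else parts m (isl ++ [x]) xs

theorem fold_parts (g : List Int → Int) (m : Int) : ∀ (l : List Int) (c : Int) (isl : List Int),
    (if (l.foldl (aStep g m) (c, isl)).2 ≠ [] then (l.foldl (aStep g m) (c, isl)).1 + g (l.foldl (aStep g m) (c, isl)).2 else (l.foldl (aStep g m) (c, isl)).1)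
      = c + ((parts m isl l).map g).sum := by
  intro l
  induction l with
  | nil =>
    intro c isl
    by_cases hi : isl = [] <;> simp [parts, hi]
  | cons x xs ih =>
    intro c isl
    by_cases hx : x = m
    · by_cases hi : isl = []
      · have h1 : aStep g m (c, isl) x = (c, isl) := by simp [aStep, hx, hi]
        rw [List.foldl_cons, h1]
        have := ih c isl
        simp [parts, hx, hi] at this ⊢
        rw [this]
      · have h1 : aStep g m (c, isl) x = (c + g isl, []) := by simp [aStep, hx, hi]
        rw [List.foldl_cons, h1]
        have := ih (c + g isl) []
        simp [parts, hx, hi] at this ⊢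
        rw [this]; ring
    · have h1 : aStep g m (c, isl) x = (c, isl ++ [x]) := by simp [aStep, hx]
      rw [List.foldl_cons, h1]
      have := ih c (isl ++ [x])
      simp [parts, hx] at this ⊢
      rw [this]

theorem mem_parts_prop (m : Int) (P : Int → Prop) : ∀ (l isl : List Int),
    (∀ x ∈ isl, P x ∧ x ≠ m) → (∀ x ∈ l, P x) →
    ∀ s ∈ parts m isl l, s ≠ [] ∧ ∀ x ∈ s, P x ∧ x ≠ m := by
  intro l
  induction l with
  | nil =>
    intro isl hisl _ s hs
    by_cases hi : isl = [] <;> simp [parts, hi] at hs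
    subst hs; exact ⟨hi, hisl⟩
  | cons x xs ih =>
    intro isl hisl hl s hs
    by_cases hx : x = m
    · by_cases hi : isl = []
      · simp only [parts, if_pos hx, if_pos hi] at hs
        exact ih [] (by simp) (fun y hy => hl y (List.mem_cons_of_mem _ hy)) s hs
      · simp only [parts, if_pos hx, if_neg hi] at hs
        rcases List.mem_cons.mp hs with rfl | hs
        · exact ⟨hi, hisl⟩
        · exact ih [] (by simp) (fun y hy => hl y (List.mem_cons_of_mem _ hy)) s hs
    · simp only [parts, if_neg hx] at hs
      refine ih (isl ++ [x]) ?_ (fun y hy => hl y (List.mem_cons_of_mem _ hy)) s hs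
      intro y hy
      rcases List.mem_append.mp hy with hy | hy
      · exact hisl y hy
      · simp at hy; subst hy
        exact ⟨hl y (List.mem_cons_self ..), hx⟩

theorem parts_length (m : Int) : ∀ (l isl : List Int), ∀ s ∈ parts m isl l,
    s.length + l.count m ≤ isl.length + l.length := by
  intro l
  induction l with
  | nil =>
    intro isl s hs
    by_cases hi : isl = [] <;> simp [parts, hi] at hs
    subst hs; simp
  | cons x xs ih =>
    intro isl s hs
    by_cases hx : x = m
    · subst hx
      simp only [List.count_cons_self, List.length_cons]
      by_cases hi : isl = []
      · simp only [parts, if_pos hi] at hs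
        have := ih [] s hs
        simp at this; omega
      · simp only [parts, if_neg hi] at hs
        rcases List.mem_cons.mp hs with rfl | hs
        · have := List.count_le_length (l := xs) (a := x)
          omega
        · have := ih [] s hs
          simp at this; omega
    · simp only [parts, if_neg hx] at hs
      have := ih (isl ++ [x]) s hs
      rw [List.count_cons_of_ne hx]
      simp at this ⊢
      omega

theorem parts_length_lt (m : Int) (l : List Int) (hm : m ∈ l) :
    ∀ s ∈ parts m [] l, s.length < l.length := by
  intro s hs
  have h1 := parts_length m l [] s hs
  have h2 : 0 < l.count m := List.count_pos_iff.mpr hm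
  simp at h1
  omega

theorem parts_append (m : Int) : ∀ (pre : List Int) (isl l : List Int),
    (∀ x ∈ pre, x ≠ m) → parts m isl (pre ++ l) = parts m (isl ++ pre) l := by
  intro pre
  induction pre with
  | nil => intro isl l _; simp
  | cons x xs ih =>
    intro isl l h
    have hx : x ≠ m := h x (List.mem_cons_self ..)
    simp only [List.cons_append, parts, if_neg hx]
    rw [ih (isl ++ [x]) l (fun y hy => h y (List.mem_cons_of_mem _ hy))]
    simp

theorem parts_no_m (m : Int) (l : List Int) (h : ∀ x ∈ l, x ≠ m) (hne : l ≠ []) :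
    parts m [] l = [l] := by
  have := parts_append m l [] [] h
  simp at this
  rw [this, parts, if_neg hne]

theorem unfold_fuel (fuel : Nat) (l : List Int) (m : Int)
    (hm : PySem.List.min? l (fun x => x) = some m) :
    find_islands_fuel (fuel+1) l = 1 + ((parts m [] l).map (find_islands_fuel fuel)).sum := by
  simp only [find_islands_fuel, hm]
  exact fold_parts _ m l 1 []

theorem fuel_stable : ∀ (n : Nat) (l : List Int), l ≠ [] → l.length ≤ n →
    ∀ f, l.length ≤ f → find_islands_fuel f l = find_islands l := by
  intro n
  induction n with
  | zero =>
    intro l hl hln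
    exact absurd (List.length_eq_zero_iff.mp (Nat.le_zero.mp hln)) hl
  | succ n ih =>
    intro l hl hln f hlf
    obtain ⟨m, hm⟩ : ∃ m, PySem.List.min? l (fun x => x) = some m := by
      cases hmm : PySem.List.min? l (fun x => x) with
      | none => exact absurd ((PySem.List.min?_eq_none_iff _ _).mp hmm) hl
      | some m => exact ⟨m, rfl⟩
    have hlen : 0 < l.length := List.length_pos_iff.mpr hl
    obtain ⟨f', rfl⟩ : ∃ f', f = f' + 1 := ⟨f - 1, by omega⟩
    obtain ⟨k, hk⟩ : ∃ k, l.length = k + 1 := ⟨l.length - 1, by omega⟩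
    have hml : m ∈ l := PySem.List.min?_mem hm
    have hcong : ∀ s ∈ parts m [] l, find_islands_fuel f' s = find_islands_fuel k s := by
      intro s hs
      have hslt := parts_length_lt m l hml s hs
      have hsne : s ≠ [] := (mem_parts_prop m (fun _ => True) l [] (by simp) (by simp) s hs).1
      rw [ih s hsne (by omega) f' (by omega), ih s hsne (by omega) k (by omega)]
    show find_islands_fuel (f' + 1) l = find_islands_fuel l.length l
    rw [hk, unfold_fuel f' l m hm, unfold_fuel k l m hm, List.map_congr_left hcong]

theorem A1 (l : List Int) (hl : l ≠ []) (m : Int)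
    (hm : PySem.List.min? l (fun x => x) = some m) :
    find_islands l = 1 + ((parts m [] l).map find_islands).sum := by
  have hlen : 0 < l.length := List.length_pos_iff.mpr hl
  obtain ⟨k, hk⟩ : ∃ k, l.length = k + 1 := ⟨l.length - 1, by omega⟩
  have hml : m ∈ l := PySem.List.min?_mem hm
  show find_islands_fuel l.length l = _
  rw [hk, unfold_fuel k l m hm]
  congr 1
  apply congrArg
  apply List.map_congr_left
  intro s hs
  have hslt := parts_length_lt m l hml s hs
  have hsne : s ≠ [] := (mem_parts_prop m (fun _ => True) l [] (by simp) (by simp) s hs).1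
  exact fuel_stable s.length s hsne le_rfl k (by omega)

def P1 (l : List Int) : Prop := ∀ (S : List Int) (c m : Int),
  PySem.List.min? l (fun x => x) = some m → (∀ t ∈ S, t < m) →
  ∃ T : List Int, (∀ t ∈ T, m < t) ∧ l.foldl bstep (S, c) = (T ++ m :: S, c + find_islands l)

def P2 (m : Int) (l : List Int) : Prop := ∀ (S : List Int) (c : Int),
  (∀ x ∈ l, m ≤ x) → (∀ t ∈ S, t < m) →
  ∃ T : List Int, (∀ t ∈ T, m < t) ∧
    l.foldl bstep (m :: S, c) = (T ++ m :: S, c + ((parts m [] l).map find_islands).sum)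

theorem dropWhile_all_lt (m : Int) (S : List Int) (h : ∀ t ∈ S, t < m) :
    S.dropWhile (fun t => m < t) = S := by
  cases S with
  | nil => rfl
  | cons x xs =>
    have hx := h x (List.mem_cons_self ..)
    rw [List.dropWhile_cons, if_neg (by simp; omega)]

theorem dropWhile_append_gt (m : Int) (U V : List Int) (hU : ∀ t ∈ U, m < t) :
    (U ++ V).dropWhile (fun t => m < t) = V.dropWhile (fun t => m < t) := by
  induction U with
  | nil => rfl
  | cons x xs ih =>
    have hx := hU x (List.mem_cons_self ..)
    rw [List.cons_append, List.dropWhile_cons, if_pos (by simpa using hx)]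
    exact ih (fun t ht => hU t (List.mem_cons_of_mem _ ht))

theorem bstep_push (S : List Int) (c m : Int) (hS : ∀ t ∈ S, t < m) :
    bstep (S, c) m = (m :: S, c + 1) := by
  cases S with
  | nil => rfl
  | cons x xs =>
    have hx := hS x (List.mem_cons_self ..)
    simp only [bstep, dropWhile_all_lt m _ hS]
    rw [if_pos hx]

theorem bstep_pop_push (U S : List Int) (c m : Int) (hU : ∀ t ∈ U, m < t) (hS : ∀ t ∈ S, t < m) :
    bstep (U ++ S, c) m = (m :: S, c + 1) := by
  simp only [bstep, dropWhile_append_gt m U _ hU, dropWhile_all_lt m S hS]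
  cases S with
  | nil => rfl
  | cons x xs =>
    have hx := hS x (List.mem_cons_self ..)
    simp only []
    rw [if_pos hx]

theorem bstep_skip (U S : List Int) (c m : Int) (hU : ∀ t ∈ U, m < t) :
    bstep (U ++ m :: S, c) m = (m :: S, c) := by
  simp only [bstep, dropWhile_append_gt m U _ hU, List.dropWhile_cons]
  rw [if_neg (by simp)]
  simp only []
  rw [if_neg (by omega)]

theorem min?_id_isMin {l : List Int} {m : Int} (hm : PySem.List.min? l (fun x => x) = some m) :
    ∀ y ∈ l, m ≤ y := PySem.List.min?_isMin hm

theorem joint : ∀ n : Nat, (∀ l, 2 * l.length ≤ n → P1 l) ∧ (∀ m l, 2 * l.length + 1 ≤ n → P2 m l) := by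
  intro n
  induction n using Nat.strong_induction_on with
  | _ n IH =>
  constructor
  · -- P1
    intro l hn S c m hm hS
    have hml : m ∈ l := PySem.List.min?_mem hm
    have hl : l ≠ [] := List.ne_nil_of_mem hml
    have hmin : ∀ y ∈ l, m ≤ y := min?_id_isMin hm
    -- split l at the first occurrence of m
    have hsplit : l.takeWhile (fun x => x != m) ++ l.dropWhile (fun x => x != m) = l :=
      List.takeWhile_append_dropWhile
    set pre := l.takeWhile (fun x => x != m) with hpre_def
    set rest := l.dropWhile (fun x => x != m) with hrest_def
    have hpre_ne_m : ∀ x ∈ pre, x ≠ m := fun x hx => by simpa using List.mem_takeWhile_imp hx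
    have hpre_sub : ∀ x ∈ pre, x ∈ l := fun x hx => (List.takeWhile_prefix _).subset hx
    have hrest_ne : rest ≠ [] := by
      intro h; rw [h, List.append_nil] at hsplit
      exact (hpre_ne_m m (hsplit ▸ hml)) rfl
    obtain ⟨y, suf, hys⟩ : ∃ y suf, rest = y :: suf := by
      cases hr : rest with
      | nil => exact absurd hr hrest_ne
      | cons a b => exact ⟨a, b, rfl⟩
    have hy : y = m := by
      have hw : l.dropWhile (fun x => x != m) ≠ [] := by rw [← hrest_def]; exact hrest_ne
      have := List.head_dropWhile_not (fun x => x != m) hw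
      have h2 : (l.dropWhile (fun x => x != m)).head hw = y := by
        simp only [← hrest_def, hys, List.head_cons]
      rw [h2] at this; simpa using this
    have hleq : pre ++ m :: suf = l := by rw [← hsplit, hys, hy]
    have hlen : l.length = pre.length + suf.length + 1 := by rw [← hleq, List.length_append, List.length_cons]; omega
    have hsuf_ge : ∀ x ∈ suf, m ≤ x := fun x hx => hmin x (by rw [← hleq]; simp [hx])
    -- the tail after the first m is handled by P2
    have hP2 : P2 m suf := (IH (n - 1) (by omega)).2 m suf (by omega)
    -- A's value of l via its decomposition
    have hA := A1 l hl m hm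
    have hparts : parts m [] l = if pre = [] then parts m [] suf else pre :: parts m [] suf := by
      rw [← hleq, parts_append m pre [] (m :: suf) hpre_ne_m, List.nil_append]
      by_cases hp : pre = []
      · simp [hp, parts]
      · simp [parts, hp]
    by_cases hp : pre = []
    · -- l = m :: suf
      have hlms : l = m :: suf := by rw [← hleq, hp, List.nil_append]
      rw [hlms, List.foldl_cons, bstep_push S c m hS]
      obtain ⟨T, hT, hrun⟩ := hP2 S (c + 1) hsuf_ge hS
      refine ⟨T, hT, ?_⟩
      rw [hrun, ← hlms, hA, hparts, if_pos hp]
      ring_nf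
    · -- l = pre ++ m :: suf with pre nonempty, handled by P1 on pre then P2 on suf
      obtain ⟨m1, hm1⟩ : ∃ m1, PySem.List.min? pre (fun x => x) = some m1 := by
        cases hmm : PySem.List.min? pre (fun x => x) with
        | none => exact absurd ((PySem.List.min?_eq_none_iff _ _).mp hmm) hp
        | some m1 => exact ⟨m1, rfl⟩
      have hm1mem : m1 ∈ pre := PySem.List.min?_mem hm1
      have hmm1 : m < m1 :=
        lt_of_le_of_ne (hmin m1 (hpre_sub m1 hm1mem)) (fun h => hpre_ne_m m1 hm1mem h.symm)
      have hP1pre : P1 pre := (IH (n - 2) (by omega)).1 pre (by omega)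
      obtain ⟨T1, hT1, hrun1⟩ := hP1pre S c m1 hm1 (fun t ht => lt_trans (hS t ht) hmm1)
      rw [← hleq, List.foldl_append, hrun1, List.foldl_cons]
      have hT1m : ∀ t ∈ T1 ++ [m1], m < t := by
        intro t ht
        rcases List.mem_append.mp ht with ht | ht
        · exact lt_trans hmm1 (hT1 t ht)
        · simp at ht; omega
      have hpush : bstep (T1 ++ m1 :: S, c + find_islands pre) m = (m :: S, c + find_islands pre + 1) := by
        have := bstep_pop_push (T1 ++ [m1]) S (c + find_islands pre) m hT1m hS
        simpa using this
      rw [hpush]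
      obtain ⟨T, hT, hrun2⟩ := hP2 S (c + find_islands pre + 1) hsuf_ge hS
      refine ⟨T, hT, ?_⟩
      rw [hrun2, hleq, hA, hparts, if_neg hp]
      simp only [List.map_cons, List.sum_cons]
      ring_nf
  · -- P2
    intro m l hn S c hge hS
    cases hL : l with
    | nil => exact ⟨[], by simp, by simp [parts]⟩
    | cons z zs =>
    rw [← hL]
    have hl : l ≠ [] := by rw [hL]; simp
    have hsplit : l.takeWhile (fun x => x != m) ++ l.dropWhile (fun x => x != m) = l :=
      List.takeWhile_append_dropWhile
    set pre := l.takeWhile (fun x => x != m) with hpre_def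
    set rest := l.dropWhile (fun x => x != m) with hrest_def
    have hpre_ne_m : ∀ x ∈ pre, x ≠ m := fun x hx => by simpa using List.mem_takeWhile_imp hx
    have hpre_sub : ∀ x ∈ pre, x ∈ l := fun x hx => (List.takeWhile_prefix _).subset hx
    have hpre_gt : ∀ x ∈ pre, m < x := fun x hx =>
      lt_of_le_of_ne (hge x (hpre_sub x hx)) (fun h => hpre_ne_m x hx h.symm)
    by_cases hr0 : rest = []
    · -- no m in l: the whole of l is one island strictly above m
      have hpl : pre = l := by rw [← hsplit, hr0, List.append_nil]
      have hp : pre ≠ [] := by rw [hpl]; exact hl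
      obtain ⟨m1, hm1⟩ : ∃ m1, PySem.List.min? pre (fun x => x) = some m1 := by
        cases hmm : PySem.List.min? pre (fun x => x) with
        | none => exact absurd ((PySem.List.min?_eq_none_iff _ _).mp hmm) hp
        | some m1 => exact ⟨m1, rfl⟩
      have hmm1 : m < m1 := hpre_gt m1 (PySem.List.min?_mem hm1)
      have hP1l : P1 l := (IH (n - 1) (by omega)).1 l (by omega)
      have hm1l : PySem.List.min? l (fun x => x) = some m1 := by rw [← hpl]; exact hm1
      obtain ⟨T1, hT1, hrun1⟩ := hP1l (m :: S) c m1 hm1l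
        (by intro t ht; rcases List.mem_cons.mp ht with rfl | ht
            · exact hmm1
            · exact lt_trans (hS t ht) hmm1)
      refine ⟨T1 ++ [m1], ?_, ?_⟩
      · intro t ht
        rcases List.mem_append.mp ht with ht | ht
        · exact lt_trans hmm1 (hT1 t ht)
        · simp at ht; omega
      · rw [hrun1, parts_no_m m l (fun x hx => hpre_ne_m x (by rw [hpl]; exact hx)) hl]
        simp
    · -- l = pre ++ m :: suf
      obtain ⟨y, suf, hys⟩ : ∃ y suf, rest = y :: suf := by
        cases hr : rest with
        | nil => exact absurd hr hr0
        | cons a b => exact ⟨a, b, rfl⟩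
      have hy : y = m := by
        have hw : l.dropWhile (fun x => x != m) ≠ [] := by rw [← hrest_def]; exact hr0
        have := List.head_dropWhile_not (fun x => x != m) hw
        have h2 : (l.dropWhile (fun x => x != m)).head hw = y := by
          simp only [← hrest_def, hys, List.head_cons]
        rw [h2] at this; simpa using this
      have hleq : pre ++ m :: suf = l := by rw [← hsplit, hys, hy]
      have hlen : l.length = pre.length + suf.length + 1 := by rw [← hleq, List.length_append, List.length_cons]; omega
      have hsuf_ge : ∀ x ∈ suf, m ≤ x := fun x hx => hge x (by rw [← hleq]; simp [hx])
      have hP2suf : P2 m suf := (IH (n - 2) (by omega)).2 m suf (by omega)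
      have hparts : parts m [] l = if pre = [] then parts m [] suf else pre :: parts m [] suf := by
        rw [← hleq, parts_append m pre [] (m :: suf) hpre_ne_m, List.nil_append]
        by_cases hp : pre = []
        · simp [hp, parts]
        · simp [parts, hp]
      by_cases hp : pre = []
      · have hlms : l = m :: suf := by rw [← hleq, hp, List.nil_append]
        have hskip : bstep (m :: S, c) m = (m :: S, c) := by
          have := bstep_skip [] S c m (by simp)
          simpa using this
        rw [hlms, List.foldl_cons, hskip]
        obtain ⟨T, hT, hrun⟩ := hP2suf S c hsuf_ge hS
        refine ⟨T, hT, ?_⟩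
        rw [hrun, ← hlms, hparts, if_pos hp]
      · obtain ⟨m1, hm1⟩ : ∃ m1, PySem.List.min? pre (fun x => x) = some m1 := by
          cases hmm : PySem.List.min? pre (fun x => x) with
          | none => exact absurd ((PySem.List.min?_eq_none_iff _ _).mp hmm) hp
          | some m1 => exact ⟨m1, rfl⟩
        have hmm1 : m < m1 := hpre_gt m1 (PySem.List.min?_mem hm1)
        have hP1pre : P1 pre := (IH (n - 1) (by omega)).1 pre (by omega)
        obtain ⟨T1, hT1, hrun1⟩ := hP1pre (m :: S) c m1 hm1
          (by intro t ht; rcases List.mem_cons.mp ht with rfl | ht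
              · exact hmm1
              · exact lt_trans (hS t ht) hmm1)
        rw [← hleq, List.foldl_append, hrun1, List.foldl_cons]
        have hT1m : ∀ t ∈ T1 ++ [m1], m < t := by
          intro t ht
          rcases List.mem_append.mp ht with ht | ht
          · exact lt_trans hmm1 (hT1 t ht)
          · simp at ht; omega
        have hskip : bstep (T1 ++ m1 :: m :: S, c + find_islands pre) m
            = (m :: S, c + find_islands pre) := by
          have := bstep_skip (T1 ++ [m1]) S (c + find_islands pre) m hT1m
          simpa using this
        rw [hskip]
        obtain ⟨T, hT, hrun2⟩ := hP2suf S (c + find_islands pre) hsuf_ge hS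
        refine ⟨T, hT, ?_⟩
        rw [hrun2, hleq, hparts, if_neg hp]
        simp only [List.map_cons, List.sum_cons]
        ring_nf

-- ===== VERDICT (by name: the statement is the Claim_ definition above) =====
theorem find_islands_spec : Claim_equal_find_islands := by
  intro numbers _ hpre
  unfold Spec_find_islands
  obtain ⟨m, hm⟩ : ∃ m, PySem.List.min? numbers (fun x => x) = some m := by
    cases hmm : PySem.List.min? numbers (fun x => x) with
    | none => exact absurd ((PySem.List.min?_eq_none_iff _ _).mp hmm) hpre
    | some m => exact ⟨m, rfl⟩
  obtain ⟨T, _, hrun⟩ :=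
    (joint (2 * numbers.length)).1 numbers le_rfl [] 0 m hm (by simp)
  unfold find_islands_alt
  rw [hrun]
  simp
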